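-- pv_equiv track=rewrite | github.com/Cosmo767/Practice | jason_algos_one/name_dog_ate_most_rats.py | name_of_dog_that_ate_the_most_rats
-- ===== SOURCE A (Python) =====
-- def name_of_dog_that_ate_the_most_rats(dogs):
--     """return the name of the dog that ate the most rats. If they ate an equal
--     number of rats, return the name of the dog that comes first alphabetically.
--     If there are no ate rats, return the empty string.
--     Sample input: {"ralph": ["rat", "dog", "chicken", "rat", "rat", "chicken", "alligator"], "big": [],
--     "golden": ["rat", "dolphin"], "wolf": ["rat", "rat", "cat"]}"""
--     '''
--     notes: input is a dict with a list for the value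
--
--     most_rats = 0
--     dog_ate_most = ""
--     for dog_key in dogs_dict
--         current_rat_count = 0
--         iterate over each list and count the number of rats
--
--         if current_rat_count > most_rats
--             most_rat_count = most_rats
--             dog_ate_most = dog_key
--         elif current_rat_count == most_rats
--             dog_ate_most = dog_key if dog_ate_most > dog_key else dog_ate_most
--
--     return dog_ate_most
--     '''
--     most_rats = 0
--     dog_ate_most = ""
--     for dog_key in dogs:
--             current_rat_count = 0
--             current_dog_arr = dogs[dog_key]
--             for animal in current_dog_arr:
--                 if animal.lower() == "rat":
--                     current_rat_count += 1
--
--             if current_rat_count > most_rats: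
--                 most_rats = current_rat_count
--                 dog_ate_most = dog_key
--             elif current_rat_count == most_rats:
--                 dog_ate_most = dog_key if dog_ate_most > dog_key else dog_ate_most
--     return dog_ate_most
-- ===== SOURCE B (Python) =====
-- def name_of_dog_that_ate_the_most_rats(dogs):
--     """Two-pass version: build a rat-count table, then pick the winner."""
--     counts = {d: sum(a.lower() == "rat" for a in dogs[d]) for d in dogs}
--     best = max(counts.values(), default=0)
--     if best == 0:
--         return ""
--     return min(d for d in counts if counts[d] == best)
-- ===== Notes on version B (the rewrite author's own statement) =====
-- stated objective: simpler
-- what changed: Replaces the single running (max-count, best-name) state machine with a count-then-select decomposition: build a counts table in one pass, take the maximum, return '' if it is 0, else the alphabetically smallest name attaining it.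
import Mathlib
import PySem

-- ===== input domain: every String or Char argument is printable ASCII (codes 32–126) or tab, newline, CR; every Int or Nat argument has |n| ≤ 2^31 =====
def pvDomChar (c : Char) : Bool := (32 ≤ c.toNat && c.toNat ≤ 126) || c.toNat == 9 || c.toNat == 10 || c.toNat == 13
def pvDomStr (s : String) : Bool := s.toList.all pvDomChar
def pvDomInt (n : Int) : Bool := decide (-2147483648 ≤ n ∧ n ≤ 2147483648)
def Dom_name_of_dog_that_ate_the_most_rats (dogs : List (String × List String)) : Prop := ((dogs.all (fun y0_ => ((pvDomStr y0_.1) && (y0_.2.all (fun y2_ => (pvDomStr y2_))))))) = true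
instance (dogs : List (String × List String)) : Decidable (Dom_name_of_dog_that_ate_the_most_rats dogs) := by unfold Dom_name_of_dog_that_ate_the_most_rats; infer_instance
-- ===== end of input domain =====

-- B replaces A's single running (max-count, best-name) state machine by a count-then-select
-- decomposition (counts table, then max, then alphabetical min among achievers); objective: simpler.

-- ===== PORT A =====
-- one pass over the dict, keeping (most_rats, dog_ate_most); inner loop counts case-insensitive "rat"
def name_of_dog_that_ate_the_most_rats (dogs : List (String × List String)) : String :=
  (dogs.foldl
    (fun (st : Int × String) p =>
      let current_rat_count : Int :=
        p.2.foldl (fun c animal => if PySem.Str.lower animal = "rat" then c + 1 else c) 0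
      if current_rat_count > st.1 then (current_rat_count, p.1)
      else if current_rat_count = st.1 then (st.1, if p.1 < st.2 then p.1 else st.2)
      else st)
    (0, "")).2

-- ===== PORT B =====
-- counts table, then best = max (default 0), then '' or the alphabetically first achiever
def name_of_dog_that_ate_the_most_rats_alt (dogs : List (String × List String)) : String :=
  let counts : List (String × Int) :=
    dogs.map (fun p => (p.1, (p.2.countP (fun a => PySem.Str.lower a == "rat") : Int)))
  let best : Int := PySem.List.maxD (counts.map Prod.snd) (fun x => x) 0
  if best = 0 then ""
  else
    (PySem.List.min? ((counts.filter (fun p => p.2 == best)).map Prod.fst) (fun x => x)).getD ""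

-- ===== PRECONDITION & SPEC =====
def Spec_name_of_dog_that_ate_the_most_rats (dogs : List (String × List String)) (out : String) : Prop := out = name_of_dog_that_ate_the_most_rats_alt dogs
instance (dogs : List (String × List String)) (out : String) : Decidable (Spec_name_of_dog_that_ate_the_most_rats dogs out) := by unfold Spec_name_of_dog_that_ate_the_most_rats; infer_instance

-- ===== CLAIM (what is proved, stated in full; the proofs are below) =====
def Claim_equal_name_of_dog_that_ate_the_most_rats : Prop := ∀ (dogs : List (String × List String)), Dom_name_of_dog_that_ate_the_most_rats dogs → Spec_name_of_dog_that_ate_the_most_rats dogs (name_of_dog_that_ate_the_most_rats dogs)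

-- ===== LEMMAS AND PROOFS =====

-- the step of A's loop, on an already-counted entry
def pvStep (st : Int × String) (q : String × Int) : Int × String :=
  if q.2 > st.1 then (q.2, q.1)
  else if q.2 = st.1 then (st.1, if q.1 < st.2 then q.1 else st.2)
  else st

-- running maximum of the counts (A's most_rats; also B's best)
def pvMax (cs : List (String × Int)) : Int := cs.foldl (fun m q => max m q.2) 0

-- B's selection, on the counts list
def pvSel (cs : List (String × Int)) : String :=
  (PySem.List.min? ((cs.filter (fun q => q.2 == pvMax cs)).map Prod.fst) (fun x => x)).getD ""

lemma pvLe_foldlMax (cs : List (String × Int)) (a : Int) :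
    a ≤ cs.foldl (fun m q => max m q.2) a := by
  induction cs generalizing a with
  | nil => simp
  | cons q t ih => exact le_trans (le_max_left _ _) (ih _)

lemma pvMax_nonneg (cs : List (String × Int)) : 0 ≤ pvMax cs := pvLe_foldlMax cs 0

lemma pvMem_le_foldlMax (cs : List (String × Int)) (a : Int) (q : String × Int) (hq : q ∈ cs) :
    q.2 ≤ cs.foldl (fun m q => max m q.2) a := by
  induction cs generalizing a with
  | nil => cases hq
  | cons x t ih =>
      rcases List.mem_cons.mp hq with rfl | hq'
      · exact le_trans (le_max_right _ _) (pvLe_foldlMax t _)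
      · exact ih _ hq'

lemma pvMem_le_pvMax (cs : List (String × Int)) (q : String × Int) (hq : q ∈ cs) :
    q.2 ≤ pvMax cs := pvMem_le_foldlMax cs 0 q hq

lemma pvMax_append (cs : List (String × Int)) (q : String × Int) :
    pvMax (cs ++ [q]) = max (pvMax cs) q.2 := by
  unfold pvMax; simp [List.foldl_append]

lemma pvNot_lt_empty (s : String) : ¬ s < "" := by
  intro h
  rw [String.lt_iff_toList_lt] at h
  simp only [String.toList_empty] at h
  exact List.not_lt_nil _ h

lemma pvFoldlMax_unattained (t : List (String × Int)) (a : Int)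
    (h : ∀ r ∈ t, r.2 ≠ t.foldl (fun m q => max m q.2) a) :
    t.foldl (fun m q => max m q.2) a = a := by
  induction t generalizing a with
  | nil => rfl
  | cons x u ihu =>
      simp only [List.foldl_cons] at h ⊢
      have hrec : u.foldl (fun m q => max m q.2) (max a x.2) = max a x.2 := by
        apply ihu
        intro r hr
        exact h r (List.mem_cons_of_mem _ hr)
      have hx : x.2 ≠ u.foldl (fun m q => max m q.2) (max a x.2) := h x List.mem_cons_self
      rw [hrec] at hx ⊢
      rcases max_cases a x.2 with ⟨he, _⟩ | ⟨he, _⟩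
      · exact he
      · exact absurd he.symm hx

-- the loop invariant: A's fold state = (max so far, B's selection so far)
lemma pvLoop (cs : List (String × Int)) :
    cs.foldl pvStep (0, "") = (pvMax cs, if pvMax cs = 0 then "" else pvSel cs) := by
  induction cs using List.reverseRecOn with
  | nil => simp [pvMax]
  | append_singleton l q ih =>
      rw [List.foldl_append, List.foldl_cons, List.foldl_nil, ih]
      by_cases h1 : q.2 > pvMax l
      · -- new strict maximum: q is the unique achiever
        have hmax : max (pvMax l) q.2 = q.2 := max_eq_right (le_of_lt h1)
        have hpos : ¬ q.2 = 0 := by have := pvMax_nonneg l; omega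
        have hfl : l.filter (fun r => r.2 == q.2) = [] := by
          rw [List.filter_eq_nil_iff]
          intro r hr hbe
          have := pvMem_le_pvMax l r hr
          simp only [beq_iff_eq] at hbe
          omega
        rw [pvMax_append, hmax]
        simp only [pvStep, if_pos h1, if_neg hpos]
        unfold pvSel
        rw [pvMax_append, hmax, List.filter_append, hfl, List.nil_append, List.filter_cons]
        simp [PySem.List.min?_id_cons]
      · by_cases h2 : q.2 = pvMax l
        · -- tie with the running maximum
          have hmax : max (pvMax l) q.2 = pvMax l := max_eq_left (le_of_eq h2)
          rw [pvMax_append, hmax]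
          simp only [pvStep, if_neg h1, if_pos h2]
          by_cases h0 : pvMax l = 0
          · simp [h0, pvNot_lt_empty q.1]
          · -- pvMax l > 0 is attained in l, so the old achiever list is nonempty
            simp only [if_neg h0]
            have hne : (l.filter (fun r => r.2 == pvMax l)) ≠ [] := by
              intro hnil
              apply h0
              have hnoatt : ∀ r ∈ l, r.2 ≠ pvMax l := by
                intro r hr hre
                have := List.filter_eq_nil_iff.mp hnil r hr
                simp [hre] at this
              exact pvFoldlMax_unattained l 0 hnoatt
            obtain ⟨x, t, hxt⟩ := List.exists_cons_of_ne_nil hne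
            have hq2 : (q.2 == pvMax l) = true := by simp [h2]
            have hSl : pvSel l = (t.map Prod.fst).foldl min x.1 := by
              unfold pvSel
              rw [hxt, List.map_cons, PySem.List.min?_id_cons]
              rfl
            have hSl' : pvSel (l ++ [q]) = min ((t.map Prod.fst).foldl min x.1) q.1 := by
              unfold pvSel
              rw [pvMax_append, hmax, List.filter_append, hxt, List.filter_cons, hq2]
              simp only [if_pos trivial, List.filter_nil, List.cons_append, List.map_cons,
                PySem.List.min?_id_cons, Option.getD_some, List.map_append, List.foldl_append,
                List.map_nil, List.foldl_cons, List.foldl_nil]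
            rw [hSl, hSl']
            rcases lt_or_ge q.1 ((t.map Prod.fst).foldl min x.1) with hlt | hge
            · rw [if_pos hlt, min_eq_right (le_of_lt hlt)]
            · rw [if_neg (not_lt.mpr hge), min_eq_left hge]
        · -- strictly below the running maximum: entry is discarded on both sides
          have h3 : q.2 < pvMax l := lt_of_le_of_ne (not_lt.mp h1) h2
          have hmax : max (pvMax l) q.2 = pvMax l := max_eq_left (le_of_lt h3)
          rw [pvMax_append, hmax]
          simp only [pvStep, if_neg h1, if_neg h2]
          congr 1
          by_cases h0 : pvMax l = 0
          · simp [h0]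
          · simp only [if_neg h0]
            unfold pvSel
            rw [pvMax_append, hmax, List.filter_append, List.filter_cons]
            have hq2 : (q.2 == pvMax l) = false := by simp [h2]
            simp [hq2]

lemma pvFoldlMax_map (u : List (String × Int)) (a : Int) :
    (u.map Prod.snd).foldl max a = u.foldl (fun m r => max m r.2) a := by
  induction u generalizing a with
  | nil => rfl
  | cons x v ih => simp [List.foldl_cons, ih]

lemma pvMaxD_eq (cs : List (String × Int)) (h : ∀ q ∈ cs, 0 ≤ q.2) :
    PySem.List.maxD (cs.map Prod.snd) (fun x => x) 0 = pvMax cs := by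
  cases cs with
  | nil => decide
  | cons q t =>
      have hq : 0 ≤ q.2 := h q List.mem_cons_self
      simp only [List.map_cons, PySem.List.maxD, PySem.List.max?_id_cons, Option.getD_some]
      unfold pvMax
      rw [List.foldl_cons, max_eq_right hq, pvFoldlMax_map]

-- A's inner counting loop is countP
lemma pvCnt (v : List String) :
    v.foldl (fun c animal => if PySem.Str.lower animal = "rat" then c + 1 else c) (0 : Int)
      = ((v.countP (fun a => PySem.Str.lower a == "rat") : Nat) : Int) := by
  have := PySem.List.foldl_count_if (fun a => PySem.Str.lower a == "rat") v 0
  simpa [beq_iff_eq] using this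

-- ===== VERDICT (by name: the statement is the Claim_ definition above) =====
theorem name_of_dog_that_ate_the_most_rats_spec : Claim_equal_name_of_dog_that_ate_the_most_rats := by
  intro dogs _
  unfold Spec_name_of_dog_that_ate_the_most_rats
  unfold name_of_dog_that_ate_the_most_rats name_of_dog_that_ate_the_most_rats_alt
  set cs : List (String × Int) :=
    dogs.map (fun p => (p.1, (p.2.countP (fun a => PySem.Str.lower a == "rat") : Int))) with hcs
  have hnn : ∀ q ∈ cs, 0 ≤ q.2 := by
    intro q hq
    rw [hcs] at hq
    obtain ⟨p, _, rfl⟩ := List.mem_map.mp hq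
    exact Int.natCast_nonneg _
  have hfold :
      dogs.foldl
        (fun (st : Int × String) p =>
          let current_rat_count : Int :=
            p.2.foldl (fun c animal => if PySem.Str.lower animal = "rat" then c + 1 else c) 0
          if current_rat_count > st.1 then (current_rat_count, p.1)
          else if current_rat_count = st.1 then (st.1, if p.1 < st.2 then p.1 else st.2)
          else st)
        (0, "")
      = cs.foldl pvStep (0, "") := by
    rw [hcs, List.foldl_map]
    congr 1
    funext st p
    simp only [pvStep, pvCnt]
  rw [hfold, pvLoop]
  simp only [pvMaxD_eq cs hnn]
  rfl
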